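-- pv_equiv track=rewrite | github.com/pathoplexus/silo-lineage-hierarchy-definitions | scripts/generate_hierarchy.py | convert_to_silo_format
-- ===== SOURCE A (Python) =====
-- from collections import OrderedDict, defaultdict
-- from typing import Any, Dict, List
--
-- def topological_sort(lineages: Dict[str, Any]) -> List[str]:
--     """
--     Sort lineages topologically (parents before children, depth-first).
--     Returns a list of lineage names in the correct order.
--     """
--     # Build adjacency list for children
--     children = defaultdict(list)
--     roots = []
--
--     for name, data in lineages.items():
--         parent = data["parent"]
--         if parent == "none":
--             roots.append(name)
--         else:
--             children[parent].append(name)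
--
--     # Depth-first traversal
--     visited = set()
--     result = []
--
--     def dfs(node: str):
--         if node in visited:
--             return
--         visited.add(node)
--         result.append(node)
--
--         # Sort children alphabetically for consistent output
--         for child in sorted(children[node]):
--             dfs(child)
--
--     # Process all roots (should typically be just one per subtype)
--     for root in sorted(roots):
--         dfs(root)
--
--     return result
--
-- def convert_to_silo_format(lineages: Dict[str, Any]) -> OrderedDict:
--     """Convert lineage data to silo hierarchy format with topological ordering."""
--     silo_hierarchy = OrderedDict()
--
--     # Get topologically sorted order
--     sorted_names = topological_sort(lineages)
--
--     # Build hierarchy in correct order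
--     for name in sorted_names:
--         data = lineages[name]
--         silo_hierarchy[name] = {
--             "aliases": [],
--             "parents": [data["parent"]] if data["parent"] != "none" else [],
--         }
--
--     return silo_hierarchy
-- ===== SOURCE B (Python) =====
-- from collections import OrderedDict
-- from typing import Any, Dict
--
--
-- def convert_to_silo_format(lineages: Dict[str, Any]) -> OrderedDict:
--     """Convert lineage data to silo hierarchy format with topological ordering.
--
--     Different decomposition: no adjacency dict and no recursion.  Roots and the
--     (sorted) children of a node are obtained by filtering the items directly,
--     and the alphabetical depth-first preorder is produced by an iterative loop
--     over an explicit stack; the result dict is built in one comprehension.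
--     """
--     items = list(lineages.items())
--
--     def kids(p):
--         return sorted(n for n, d in items if d["parent"] != "none" and d["parent"] == p)
--
--     roots = sorted(n for n, d in items if d["parent"] == "none")
--
--     order = []
--     seen = set()
--     stack = list(reversed(roots))
--     while stack:
--         node = stack.pop()
--         if node in seen:
--             continue
--         seen.add(node)
--         order.append(node)
--         stack.extend(reversed(kids(node)))
--
--     return OrderedDict(
--         (
--             name,
--             {
--                 "aliases": [],
--                 "parents": [] if lineages[name]["parent"] == "none" else [lineages[name]["parent"]],
--             },
--         )
--         for name in order
--     )
-- ===== Notes on version B (the rewrite author's own statement) =====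
-- stated objective: alternative
-- what changed: Instead of pre-building a defaultdict adjacency and recursing, B filters the item list to get roots and each node's sorted children on demand, runs an iterative explicit-stack DFS (visited check on pop, children pushed in reverse), and builds the result OrderedDict in a single comprehension.
import Mathlib
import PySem

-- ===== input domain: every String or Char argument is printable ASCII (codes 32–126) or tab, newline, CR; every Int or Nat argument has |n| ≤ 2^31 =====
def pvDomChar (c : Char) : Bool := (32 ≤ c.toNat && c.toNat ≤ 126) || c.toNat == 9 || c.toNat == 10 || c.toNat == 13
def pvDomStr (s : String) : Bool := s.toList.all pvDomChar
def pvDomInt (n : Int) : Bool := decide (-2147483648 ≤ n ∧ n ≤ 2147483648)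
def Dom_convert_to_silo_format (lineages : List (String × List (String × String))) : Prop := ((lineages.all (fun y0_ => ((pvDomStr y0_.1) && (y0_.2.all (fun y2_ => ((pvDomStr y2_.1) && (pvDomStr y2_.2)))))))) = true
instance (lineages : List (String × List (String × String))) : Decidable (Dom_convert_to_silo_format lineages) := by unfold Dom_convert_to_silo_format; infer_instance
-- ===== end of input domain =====

-- B drops the pre-built defaultdict adjacency and the recursion: roots and each node's
-- sorted children are obtained by filtering the item list, the preorder comes from an
-- iterative explicit-stack loop, and the result dict is built in one comprehension.

-- data["parent"]; the KeyError case (no "parent" key) is excluded by Pre_, the default is never read there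
def pvParentOf (data : List (String × String)) : String :=
  (PySem.Dict.ofList data).getD "parent" ""

-- ===== PORT A =====

-- recursive dfs; the fuel is a totality guard only: each level visits a new key,
-- so (number of keys + 1) levels are never exhausted (proved below)
def pvDfs (children : PySem.Dict String (List String)) :
    Nat → PySem.Set String × List String → String → PySem.Set String × List String
  | 0, st, _ => st
  | fuel+1, st, node =>
    if PySem.Set.contains st.1 node then st
    else
      (PySem.List.sorted (children.getD node []) (fun x => x) false).foldl
        (pvDfs children fuel) (PySem.Set.add st.1 node, st.2 ++ [node])

def topological_sort (lineages : List (String × List (String × String))) : List String :=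
  let cr := (PySem.Dict.ofList lineages).items.foldl
    (fun acc p =>
      let parent := pvParentOf p.2
      if parent == "none" then (acc.1, acc.2 ++ [p.1])
      else (acc.1.modify parent [] (· ++ [p.1]), acc.2))
    ((PySem.Dict.empty : PySem.Dict String (List String)), ([] : List String))
  ((PySem.List.sorted cr.2 (fun x => x) false).foldl
      (pvDfs cr.1 ((PySem.Dict.ofList lineages).keys.length + 1))
      (PySem.Set.empty, [])).2

def convert_to_silo_format (lineages : List (String × List (String × String))) :
    List (String × List (String × List String)) :=
  let sorted_names := topological_sort lineages
  (sorted_names.foldl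
    (fun (silo : PySem.Dict String (List (String × List String))) name =>
      let parent := pvParentOf ((PySem.Dict.ofList lineages).getD name [])
      silo.insert name [("aliases", []), ("parents", if parent == "none" then [] else [parent])])
    PySem.Dict.empty).items

-- ===== PORT B =====

-- kids(p) = sorted(n for n, d in items if d["parent"] != "none" and d["parent"] == p)
def pvKidsB (items : List (String × List (String × String))) (p : String) : List String :=
  PySem.List.sorted
    ((items.filter (fun q => (!(pvParentOf q.2 == "none")) && (pvParentOf q.2 == p))).map (·.1))
    (fun x => x) false

-- the while loop: pop the top, skip if seen, else record it and push its kids;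
-- the fuel is a totality guard only (the loop pops at most (items+1)*(items+2) times, proved below)
def pvLoopB (kids : String → List String) :
    Nat → List String → PySem.Set String × List String → PySem.Set String × List String
  | 0, _, st => st
  | _+1, [], st => st
  | fuel+1, node :: stack, st =>
    if PySem.Set.contains st.1 node then pvLoopB kids fuel stack st
    else pvLoopB kids fuel (kids node ++ stack) (PySem.Set.add st.1 node, st.2 ++ [node])

def convert_to_silo_format_alt (lineages : List (String × List (String × String))) :
    List (String × List (String × List String)) :=
  let items := (PySem.Dict.ofList lineages).items
  let roots := PySem.List.sorted
    ((items.filter (fun q => pvParentOf q.2 == "none")).map (·.1)) (fun x => x) false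
  let order := (pvLoopB (pvKidsB items) ((items.length + 1) * (items.length + 2)) roots
      (PySem.Set.empty, [])).2
  (PySem.Dict.ofList (order.map (fun name =>
      (name,
        [("aliases", ([] : List String)),
         ("parents",
           if pvParentOf ((PySem.Dict.ofList lineages).getD name []) == "none" then []
           else [pvParentOf ((PySem.Dict.ofList lineages).getD name [])])])))).items

-- ===== PRECONDITION & SPEC =====
-- Pre_ excludes exactly the inputs where A raises KeyError: a lineage record without a "parent" key
def Pre_convert_to_silo_format (lineages : List (String × List (String × String))) : Prop :=
  ∀ p ∈ (PySem.Dict.ofList lineages).items, (PySem.Dict.ofList p.2).contains "parent" = true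
instance (lineages : List (String × List (String × String))) : Decidable (Pre_convert_to_silo_format lineages) := by unfold Pre_convert_to_silo_format; infer_instance

def pvWitness_convert_to_silo_format : (List (String × List (String × String))) :=
  [("a", [("parent", "none")]), ("b", [("parent", "a")])]

def Spec_convert_to_silo_format (lineages : List (String × List (String × String))) (out : List (String × List (String × List String))) : Prop := out = convert_to_silo_format_alt lineages
instance (lineages : List (String × List (String × String))) (out : List (String × List (String × List String))) : Decidable (Spec_convert_to_silo_format lineages out) := by unfold Spec_convert_to_silo_format; infer_instance

-- ===== CLAIM (what is proved, stated in full; the proofs are below) =====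
def Claim_equal_convert_to_silo_format : Prop := ∀ (lineages : List (String × List (String × String))), Dom_convert_to_silo_format lineages → Pre_convert_to_silo_format lineages → Spec_convert_to_silo_format lineages (convert_to_silo_format lineages)

-- ===== LEMMAS AND PROOFS =====

def pvMu (names : List String) (V : PySem.Set String) : Nat :=
  (names.filter (fun x => !PySem.Set.contains V x)).length

theorem pv_contains_iff (s : PySem.Set String) (x : String) :
    PySem.Set.contains s x = true ↔ x ∈ s := by
  simp [PySem.Set.contains]

theorem pv_contains_add (V : PySem.Set String) (n x : String) :
    PySem.Set.contains (PySem.Set.add V n) x = (PySem.Set.contains V x || x == n) := by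
  rw [Bool.eq_iff_iff]
  simp only [pv_contains_iff, Bool.or_eq_true, beq_iff_eq, PySem.Set.mem_add]

theorem pv_contains_add_mono (s : PySem.Set String) (n x : String)
    (h : PySem.Set.contains s x = true) :
    PySem.Set.contains (PySem.Set.add s n) x = true := by
  rw [pv_contains_add, h, Bool.true_or]

theorem pv_mu_mono (names : List String) (V W : PySem.Set String)
    (h : ∀ x, PySem.Set.contains V x = true → PySem.Set.contains W x = true) :
    pvMu names W ≤ pvMu names V := by
  unfold pvMu
  simp only [← List.countP_eq_length_filter]
  refine List.countP_mono_left ?_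
  intro x _ hx
  simp only [Bool.not_eq_eq_eq_not, Bool.not_true] at *
  cases hV : PySem.Set.contains V x with
  | false => rfl
  | true => exact absurd ((pv_contains_iff W x).1 (h x hV)) (by simpa using hx)

theorem pv_mu_le (names : List String) (V : PySem.Set String) :
    pvMu names V ≤ names.length :=
  List.length_filter_le _ _

theorem pv_mu_add (names : List String) (V : PySem.Set String) (n : String)
    (hnd : names.Nodup) (hn : n ∈ names) (hv : PySem.Set.contains V n = false) :
    pvMu names (PySem.Set.add V n) + 1 = pvMu names V := by
  unfold pvMu
  induction names with
  | nil => cases hn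
  | cons y t ih =>
    simp only [List.nodup_cons] at hnd
    rcases List.mem_cons.1 hn with rfl | hmem
    · have h1 : PySem.Set.contains (PySem.Set.add V n) n = true := by
        rw [pv_contains_add]; simp
      have ht : t.filter (fun x => !PySem.Set.contains (PySem.Set.add V n) x)
          = t.filter (fun x => !PySem.Set.contains V x) := by
        refine List.filter_congr ?_
        intro x hx
        have hxn : x ≠ n := fun he => hnd.1 (he ▸ hx)
        rw [pv_contains_add]
        simp [hxn]
      rw [List.filter_cons, List.filter_cons, h1, hv, ht]
      simp only [Bool.not_true, Bool.not_false, Bool.false_eq_true, if_false, if_true, List.length_cons]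
    · have hyn : y ≠ n := fun he => hnd.1 (he ▸ hmem)
      have hy : PySem.Set.contains (PySem.Set.add V n) y = PySem.Set.contains V y := by
        rw [pv_contains_add]; simp [hyn]
      have hlen := ih hnd.2 hmem
      rw [List.filter_cons, List.filter_cons, hy]
      cases hcy : PySem.Set.contains V y with
      | true =>
        simpa only [Bool.not_true, Bool.false_eq_true, if_false] using hlen
      | false =>
        simp only [Bool.not_false, if_true, List.length_cons]
        omega

theorem pv_dfs_mono (ch : PySem.Dict String (List String)) (f : Nat) :
    ∀ (st : PySem.Set String × List String) (n x : String),
      PySem.Set.contains st.1 x = true → PySem.Set.contains (pvDfs ch f st n).1 x = true := by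
  induction f with
  | zero => intro st n x h; exact h
  | succ f ih =>
    intro st n x h
    rw [pvDfs]
    split
    · exact h
    · have hinit : PySem.Set.contains (PySem.Set.add st.1 n, st.2 ++ [n]).1 x = true :=
        pv_contains_add_mono _ _ _ h
      generalize (PySem.Set.add st.1 n, st.2 ++ [n]) = st1 at hinit
      generalize PySem.List.sorted (ch.getD n []) (fun x => x) false = l
      induction l generalizing st1 with
      | nil => exact hinit
      | cons c cs ihl => exact ihl _ (ih st1 c x hinit)

theorem pv_dfs_mu_le (ch : PySem.Dict String (List String)) (names : List String)
    (f : Nat) (st : PySem.Set String × List String) (n : String) :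
    pvMu names (pvDfs ch f st n).1 ≤ pvMu names st.1 :=
  pv_mu_mono _ _ _ (fun x => pv_dfs_mono ch f st n x)

theorem pv_dfs_fuel (ch : PySem.Dict String (List String)) (names : List String)
    (hnd : names.Nodup) (hch : ∀ x c, c ∈ ch.getD x [] → c ∈ names) :
    ∀ (f g : Nat) (st : PySem.Set String × List String) (n : String), n ∈ names →
      pvMu names st.1 < f → pvMu names st.1 < g → pvDfs ch f st n = pvDfs ch g st n := by
  intro f
  induction f with
  | zero => intro g st n _ hf; omega
  | succ f ih =>
    intro g st n hn hf hg
    cases g with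
    | zero => omega
    | succ g =>
      rw [pvDfs, pvDfs]
      split
      · rfl
      · rename_i hvis
        have hv : PySem.Set.contains st.1 n = false := by
          revert hvis; cases PySem.Set.contains st.1 n <;> simp
        have hmu : pvMu names (PySem.Set.add st.1 n) + 1 = pvMu names st.1 :=
          pv_mu_add names st.1 n hnd hn hv
        have hmem : ∀ m ∈ PySem.List.sorted (ch.getD n []) (fun x => x) false, m ∈ names := by
          intro m hm
          exact hch n m ((PySem.List.mem_sorted _ _ _ _).1 hm)
        generalize hl : PySem.List.sorted (ch.getD n []) (fun x => x) false = l at hmem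
        clear hl
        have h1 : pvMu names (PySem.Set.add st.1 n, st.2 ++ [n]).1 < f := by
          simpa using by omega
        have h2 : pvMu names (PySem.Set.add st.1 n, st.2 ++ [n]).1 < g := by
          simpa using by omega
        generalize (PySem.Set.add st.1 n, st.2 ++ [n]) = st1 at h1 h2
        induction l generalizing st1 with
        | nil => rfl
        | cons c cs ihl =>
          simp only [List.foldl_cons]
          rw [ih g st1 c (hmem c (List.mem_cons_self)) h1 h2]
          exact ihl (fun m hm => hmem m (List.mem_cons_of_mem _ hm))
            (pvDfs ch g st1 c)
            (lt_of_le_of_lt (pv_dfs_mu_le ch names g st1 c) h1)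
            (lt_of_le_of_lt (pv_dfs_mu_le ch names g st1 c) h2)

def pvDfsC (ch : PySem.Dict String (List String)) (names : List String)
    (st : PySem.Set String × List String) (n : String) : PySem.Set String × List String :=
  pvDfs ch (pvMu names st.1 + 1) st n

def pvDfsL (ch : PySem.Dict String (List String)) (names : List String)
    (st : PySem.Set String × List String) (ns : List String) : PySem.Set String × List String :=
  ns.foldl (pvDfsC ch names) st

theorem pv_foldl_dfs_canon (ch : PySem.Dict String (List String)) (names : List String)
    (hnd : names.Nodup) (hch : ∀ x c, c ∈ ch.getD x [] → c ∈ names) :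
    ∀ (l : List String) (f : Nat) (st : PySem.Set String × List String),
      (∀ m ∈ l, m ∈ names) → pvMu names st.1 < f →
      l.foldl (pvDfs ch f) st = pvDfsL ch names st l := by
  intro l
  induction l with
  | nil => intros; rfl
  | cons c cs ih =>
    intro f st hm hf
    simp only [List.foldl_cons, pvDfsL]
    rw [pv_dfs_fuel ch names hnd hch f (pvMu names st.1 + 1) st c (hm c List.mem_cons_self) hf (by omega)]
    have h2 : pvMu names (pvDfs ch (pvMu names st.1 + 1) st c).1 ≤ pvMu names st.1 :=
      pv_dfs_mu_le ch names _ st c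
    have := ih f (pvDfs ch (pvMu names st.1 + 1) st c)
      (fun m hm' => hm m (List.mem_cons_of_mem _ hm')) (by omega)
    simpa [pvDfsL, pvDfsC] using this

theorem pv_dfsL_mu_le (ch : PySem.Dict String (List String)) (names : List String) :
    ∀ (ns : List String) (st : PySem.Set String × List String),
      pvMu names (pvDfsL ch names st ns).1 ≤ pvMu names st.1 := by
  intro ns
  induction ns with
  | nil => intro st; exact le_refl _
  | cons n t ih =>
    intro st
    calc pvMu names (pvDfsL ch names (pvDfsC ch names st n) t).1
        ≤ pvMu names (pvDfsC ch names st n).1 := ih _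
      _ ≤ pvMu names st.1 := pv_dfs_mu_le ch names _ st n

theorem pv_mu_pos (names : List String) (V : PySem.Set String) (n : String)
    (hn : n ∈ names) (hv : PySem.Set.contains V n = false) : 1 ≤ pvMu names V := by
  unfold pvMu
  have : n ∈ names.filter (fun x => !PySem.Set.contains V x) := by
    refine List.mem_filter.2 ⟨hn, by rw [hv]; rfl⟩
  exact List.length_pos_of_mem this

def pvBeta (names : List String) (N0 : Nat) (stk : List String) (V : PySem.Set String) : Nat :=
  stk.length + pvMu names V * (N0 + 1)

theorem pv_loopB_fuel (kids : String → List String) (names : List String) (N0 : Nat)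
    (hnd : names.Nodup) (hkm : ∀ x c, c ∈ kids x → c ∈ names)
    (hkl : ∀ x, (kids x).length ≤ N0) :
    ∀ (g g' : Nat) (stk : List String) (st : PySem.Set String × List String),
      (∀ m ∈ stk, m ∈ names) →
      pvBeta names N0 stk st.1 < g → pvBeta names N0 stk st.1 < g' →
      pvLoopB kids g stk st = pvLoopB kids g' stk st := by
  intro g
  induction g with
  | zero => intro g' stk st _ hg; omega
  | succ g ih =>
    intro g' stk st hm hg hg'
    cases g' with
    | zero => omega
    | succ g' =>
      cases stk with
      | nil => rw [pvLoopB, pvLoopB]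
      | cons node stack =>
        rw [pvLoopB, pvLoopB]
        split
        · refine ih g' stack st (fun m hm' => hm m (List.mem_cons_of_mem _ hm')) ?_ ?_ <;>
            (unfold pvBeta at *; simp only [List.length_cons] at hg hg'; omega)
        · rename_i hvis
          have hv : PySem.Set.contains st.1 node = false := by
            revert hvis; cases PySem.Set.contains st.1 node <;> simp
          have hmu : pvMu names (PySem.Set.add st.1 node) + 1 = pvMu names st.1 :=
            pv_mu_add names st.1 node hnd (hm node List.mem_cons_self) hv
          have hlc : (kids node).length ≤ N0 := hkl node
          refine ih g' _ _ ?_ ?_ ?_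
          · intro m hm'
            rcases List.mem_append.1 hm' with h1 | h2
            · exact hkm node m h1
            · exact hm m (List.mem_cons_of_mem _ h2)
          · unfold pvBeta at *
            simp only [List.length_append, List.length_cons] at *
            nlinarith [hmu, hlc, hg]
          · unfold pvBeta at *
            simp only [List.length_append, List.length_cons] at *
            nlinarith [hmu, hlc, hg']

theorem pv_loopB_step (kids : String → List String) (fuel : Nat) (node : String)
    (stack : List String) (st : PySem.Set String × List String) :
    pvLoopB kids (fuel+1) (node :: stack) st =
      if PySem.Set.contains st.1 node then pvLoopB kids fuel stack st
      else pvLoopB kids fuel (kids node ++ stack)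
        (PySem.Set.add st.1 node, st.2 ++ [node]) := rfl

def pvLoopBC (kids : String → List String) (names : List String) (N0 : Nat)
    (stk : List String) (st : PySem.Set String × List String) : PySem.Set String × List String :=
  pvLoopB kids (pvBeta names N0 stk st.1 + 1) stk st

theorem pv_main (ch : PySem.Dict String (List String)) (kids : String → List String)
    (names : List String) (N0 : Nat)
    (hnd : names.Nodup) (hch : ∀ x c, c ∈ ch.getD x [] → c ∈ names)
    (hk : ∀ x, kids x = PySem.List.sorted (ch.getD x []) (fun y => y) false)
    (hkl : ∀ x, (kids x).length ≤ N0) :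
    ∀ (k : Nat) (st : PySem.Set String × List String) (ns stk : List String),
      pvMu names st.1 ≤ k → (∀ m ∈ ns, m ∈ names) → (∀ m ∈ stk, m ∈ names) →
      pvLoopBC kids names N0 (ns ++ stk) st = pvLoopBC kids names N0 stk (pvDfsL ch names st ns) := by
  have hkm : ∀ x c, c ∈ kids x → c ∈ names := by
    intro x c hc
    rw [hk] at hc
    exact hch x c ((PySem.List.mem_sorted _ _ _ _).1 hc)
  intro k
  induction k with
  | zero =>
    intro st ns stk hk0 hns hstk
    induction ns generalizing st with
    | nil => rfl
    | cons n ns' ihns =>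
      rw [pvLoopBC, List.cons_append, pv_loopB_step]
      split
      · rename_i hvis
        have h1 : pvLoopB kids (pvBeta names N0 (n :: (ns' ++ stk)) st.1) (ns' ++ stk) st
            = pvLoopBC kids names N0 (ns' ++ stk) st := by
          refine pv_loopB_fuel kids names N0 hnd hkm hkl _ _ _ _
            (fun m hm => ?_) ?_ ?_
          · rcases List.mem_append.1 hm with h | h
            · exact hns m (List.mem_cons_of_mem _ h)
            · exact hstk m h
          · unfold pvBeta; simp only [List.length_append, List.length_cons]; omega
          · omega
        rw [h1, ihns st hk0 (fun m hm => hns m (List.mem_cons_of_mem _ hm))]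
        have h2 : pvDfsC ch names st n = st := by
          rw [pvDfsC, pvDfs]
          simp only [hvis, if_true]
        conv_rhs => rw [pvDfsL, List.foldl_cons, h2]
        rfl
      · rename_i hvis
        have hv : PySem.Set.contains st.1 n = false := by
          revert hvis; cases PySem.Set.contains st.1 n <;> simp
        have := pv_mu_pos names st.1 n (hns n List.mem_cons_self) hv
        omega
  | succ k ihk =>
    intro st ns stk hk0 hns hstk
    induction ns generalizing st with
    | nil => rfl
    | cons n ns' ihns =>
      rw [pvLoopBC, List.cons_append, pv_loopB_step]
      split
      · rename_i hvis
        have h1 : pvLoopB kids (pvBeta names N0 (n :: (ns' ++ stk)) st.1) (ns' ++ stk) st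
            = pvLoopBC kids names N0 (ns' ++ stk) st := by
          refine pv_loopB_fuel kids names N0 hnd hkm hkl _ _ _ _
            (fun m hm => ?_) ?_ ?_
          · rcases List.mem_append.1 hm with h | h
            · exact hns m (List.mem_cons_of_mem _ h)
            · exact hstk m h
          · unfold pvBeta; simp only [List.length_append, List.length_cons]; omega
          · omega
        rw [h1, ihns st hk0 (fun m hm => hns m (List.mem_cons_of_mem _ hm))]
        have h2 : pvDfsC ch names st n = st := by
          rw [pvDfsC, pvDfs]
          simp only [hvis, if_true]
        conv_rhs => rw [pvDfsL, List.foldl_cons, h2]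
        rfl
      · rename_i hvis
        have hv : PySem.Set.contains st.1 n = false := by
          revert hvis; cases PySem.Set.contains st.1 n <;> simp
        have hmu : pvMu names (PySem.Set.add st.1 n) + 1 = pvMu names st.1 :=
          pv_mu_add names st.1 n hnd (hns n List.mem_cons_self) hv
        have hlc : (kids n).length ≤ N0 := hkl n
        set c := kids n with hc
        set st1 : PySem.Set String × List String := (PySem.Set.add st.1 n, st.2 ++ [n]) with hst1
        have hmemc : ∀ m ∈ c, m ∈ names := fun m hm => hkm n m (hc ▸ hm)
        have hmu1 : pvMu names st1.1 + 1 = pvMu names st.1 := hmu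
        have hns' : ∀ m ∈ ns', m ∈ names := fun m hm => hns m (List.mem_cons_of_mem _ hm)
        have hmemrest : ∀ m ∈ ns' ++ stk, m ∈ names := by
          intro m hm
          rcases List.mem_append.1 hm with h | h
          · exact hns' m h
          · exact hstk m h
        have h1 : pvLoopB kids (pvBeta names N0 (n :: (ns' ++ stk)) st.1) (c ++ (ns' ++ stk)) st1
            = pvLoopBC kids names N0 (c ++ (ns' ++ stk)) st1 := by
          refine pv_loopB_fuel kids names N0 hnd hkm hkl _ _ _ _ (fun m hm => ?_) ?_ ?_
          · rcases List.mem_append.1 hm with h | h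
            · exact hmemc m h
            · exact hmemrest m h
          · unfold pvBeta
            simp only [List.length_append, List.length_cons]
            nlinarith [hmu1, hlc]
          · omega
        rw [h1]
        rw [ihk st1 c (ns' ++ stk) (by omega) hmemc hmemrest]
        have hmu2 : pvMu names (pvDfsL ch names st1 c).1 ≤ k :=
          le_trans (pv_dfsL_mu_le ch names c st1) (by omega)
        rw [ihk (pvDfsL ch names st1 c) ns' stk hmu2 hns' hstk]
        have h2 : pvDfsC ch names st n = pvDfsL ch names st1 c := by
          rw [pvDfsC, pvDfs]
          simp only [hvis]
          rw [← hst1]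
          rw [hc, hk]
          refine pv_foldl_dfs_canon ch names hnd hch _ (pvMu names st.1) st1
            (fun m hm => hch n m ((PySem.List.mem_sorted _ _ _ _).1 hm)) (by omega)
        conv_rhs => rw [pvDfsL, List.foldl_cons, h2]
        rfl

theorem pv_build_split :
    ∀ (l : List (String × List (String × String))) (d : PySem.Dict String (List String)) (r : List String),
      l.foldl (fun acc p =>
          let parent := pvParentOf p.2
          if parent == "none" then (acc.1, acc.2 ++ [p.1])
          else (acc.1.modify parent [] (· ++ [p.1]), acc.2)) (d, r)
      = (((l.filter (fun p => !(pvParentOf p.2 == "none"))).map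
            (fun p => (pvParentOf p.2, p.1))).foldl
            (fun d q => d.modify q.1 [] (· ++ [q.2])) d,
         r ++ (l.filter (fun p => pvParentOf p.2 == "none")).map (·.1)) := by
  intro l
  induction l with
  | nil => intro d r; simp
  | cons p t ih =>
    intro d r
    cases h : (pvParentOf p.2 == "none") with
    | true =>
      simp only [List.foldl_cons, List.filter_cons, h, Bool.not_true, Bool.false_eq_true,
        if_false, if_true, List.map_cons]
      rw [ih]
      simp
    | false =>
      simp only [List.foldl_cons, List.filter_cons, h, Bool.not_false, Bool.false_eq_true,
        if_false, if_true, List.map_cons]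
      rw [ih]

-- the DFS never records a name twice: its result list is Nodup
def pvInv (st : PySem.Set String × List String) : Prop :=
  st.2.Nodup ∧ ∀ x, x ∈ st.2 ↔ PySem.Set.contains st.1 x = true

theorem pv_dfs_inv (ch : PySem.Dict String (List String)) (f : Nat) :
    ∀ (st : PySem.Set String × List String) (n : String), pvInv st → pvInv (pvDfs ch f st n) := by
  induction f with
  | zero => intro st n h; exact h
  | succ f ih =>
    intro st n h
    rw [pvDfs]
    split
    · exact h
    · rename_i hvis
      have hv : PySem.Set.contains st.1 n = false := by
        revert hvis; cases PySem.Set.contains st.1 n <;> simp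
      have hnotin : n ∉ st.2 := fun hm => by
        have := (h.2 n).1 hm
        rw [hv] at this
        exact Bool.false_ne_true this
      have hst1 : pvInv (PySem.Set.add st.1 n, st.2 ++ [n]) := by
        constructor
        · simpa [List.nodup_append] using ⟨h.1, fun a ha ha' => hnotin (ha' ▸ ha)⟩
        · intro x
          simp only [List.mem_append, List.mem_singleton, pv_contains_add, Bool.or_eq_true,
            beq_iff_eq]
          rw [← h.2 x]
      generalize (PySem.Set.add st.1 n, st.2 ++ [n]) = st1 at hst1
      generalize PySem.List.sorted (ch.getD n []) (fun x => x) false = l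
      induction l generalizing st1 with
      | nil => exact hst1
      | cons c cs ihl => exact ihl _ (ih st1 c hst1)

theorem pv_dfsL_inv (ch : PySem.Dict String (List String)) (names : List String) :
    ∀ (ns : List String) (st : PySem.Set String × List String),
      pvInv st → pvInv (pvDfsL ch names st ns) := by
  intro ns
  induction ns with
  | nil => intro st h; exact h
  | cons n t ih => intro st h; exact ih _ (pv_dfs_inv ch _ st n h)

def pvOrderB (lineages : List (String × List (String × String))) : List String :=
  let items := (PySem.Dict.ofList lineages).items
  let roots := PySem.List.sorted
    ((items.filter (fun q => pvParentOf q.2 == "none")).map (·.1)) (fun x => x) false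
  (pvLoopB (pvKidsB items) ((items.length + 1) * (items.length + 2)) roots
      (PySem.Set.empty, [])).2

theorem pv_loopB_nil (kids : String → List String) (f : Nat)
    (st : PySem.Set String × List String) : pvLoopB kids (f+1) [] st = st := rfl

theorem pv_inv_empty : pvInv ((PySem.Set.empty : PySem.Set String), ([] : List String)) := by
  constructor
  · exact List.nodup_nil
  · intro x
    simp [PySem.Set.contains, PySem.Set.empty]

theorem pv_order_eq (lineages : List (String × List (String × String))) :
    topological_sort lineages = pvOrderB lineages ∧ (topological_sort lineages).Nodup := by
  rw [topological_sort, pvOrderB]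
  rw [pv_build_split]
  set items := (PySem.Dict.ofList lineages).items with hitems
  set names := (PySem.Dict.ofList lineages).keys with hnames
  set cp := (items.filter (fun p => !(pvParentOf p.2 == "none"))).map
      (fun p => (pvParentOf p.2, p.1)) with hcp
  set ch := cp.foldl (fun d q => d.modify q.1 [] (· ++ [q.2]))
      (PySem.Dict.empty : PySem.Dict String (List String)) with hch0
  set roots := (items.filter (fun p => pvParentOf p.2 == "none")).map (·.1) with hroots0
  have hnd : names.Nodup := PySem.Dict.nodup_keys_ofList lineages
  have hnameslen : names.length = items.length := by
    rw [hnames, hitems, PySem.Dict.keys, List.length_map]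
  have hgetD : ∀ x, ch.getD x [] = (cp.filter (fun q => q.1 == x)).map (·.2) := by
    intro x
    rw [hch0, PySem.Dict.getD_foldl_modify_append, PySem.Dict.getD_empty, List.nil_append]
  -- B's kids function computes exactly sorted(children[x])
  have hk : ∀ x, pvKidsB items x = PySem.List.sorted (ch.getD x []) (fun y => y) false := by
    intro x
    rw [pvKidsB, hgetD]
    congr 1
    simp only [hcp, List.filter_map, List.map_map, Function.comp_def, List.filter_filter]
    exact congrArg (List.map _) (List.filter_congr (fun q _ => by rw [Bool.and_comm]))
  have hch : ∀ x c, c ∈ ch.getD x [] → c ∈ names := by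
    intro x c hc
    rw [hgetD] at hc
    rcases List.mem_map.1 hc with ⟨q, hq, rfl⟩
    rcases List.mem_map.1 (List.mem_of_mem_filter hq) with ⟨p, hp, rfl⟩
    rw [hnames, PySem.Dict.keys]
    exact List.mem_map.2 ⟨p, List.mem_of_mem_filter hp, rfl⟩
  have hlen : ∀ x, (pvKidsB items x).length ≤ names.length := by
    intro x
    rw [hk, PySem.List.length_sorted, hgetD, List.length_map]
    calc (cp.filter (fun q => q.1 == x)).length ≤ cp.length := List.length_filter_le _ _
      _ ≤ items.length := by rw [hcp, List.length_map]; exact List.length_filter_le _ _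
      _ = names.length := hnameslen.symm
  have hrootmem : ∀ m ∈ roots, m ∈ names := by
    intro m hm
    rcases List.mem_map.1 hm with ⟨p, hp, rfl⟩
    rw [hnames, PySem.Dict.keys]
    exact List.mem_map.2 ⟨p, List.mem_of_mem_filter hp, rfl⟩
  have hrootlen : roots.length ≤ names.length := by
    rw [hroots0, List.length_map, hnameslen]
    exact List.length_filter_le _ _
  have hsortmem : ∀ m ∈ PySem.List.sorted ([] ++ roots) (fun x => x) false, m ∈ names := by
    intro m hm
    exact hrootmem m (by simpa using (PySem.List.mem_sorted _ _ _ _).1 hm)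
  -- A side: canonical-fuel form
  have hA : (PySem.List.sorted ([] ++ roots) (fun x => x) false).foldl
      (pvDfs ch (names.length + 1)) (PySem.Set.empty, [])
      = pvDfsL ch names (PySem.Set.empty, []) (PySem.List.sorted ([] ++ roots) (fun x => x) false) := by
    refine pv_foldl_dfs_canon ch names hnd hch _ _ _ hsortmem ?_
    have h2 := pv_mu_le names ((PySem.Set.empty : PySem.Set String), ([] : List String)).1
    omega
  -- B side: canonical-fuel form; B's root stack is the same sorted root list
  have hroots' : PySem.List.sorted roots (fun x => x) false
      = PySem.List.sorted ([] ++ roots) (fun x => x) false := by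
    rw [List.nil_append]
  have hbeta : pvBeta names names.length (PySem.List.sorted ([] ++ roots) (fun x => x) false)
      (PySem.Set.empty : PySem.Set String) < (items.length + 1) * (items.length + 2) := by
    unfold pvBeta
    have h1 : (PySem.List.sorted ([] ++ roots) (fun x => x) false).length ≤ names.length := by
      rw [PySem.List.length_sorted]; simpa using hrootlen
    have h2 := pv_mu_le names (PySem.Set.empty : PySem.Set String)
    rw [← hnameslen]
    nlinarith
  have hkm : ∀ x c, c ∈ pvKidsB items x → c ∈ names := by
    intro x c hc
    rw [hk] at hc
    exact hch x c ((PySem.List.mem_sorted _ _ _ _).1 hc)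
  have hB : pvLoopB (pvKidsB items) ((items.length + 1) * (items.length + 2))
        (PySem.List.sorted ([] ++ roots) (fun x => x) false) (PySem.Set.empty, [])
      = pvLoopBC (pvKidsB items) names names.length
        (PySem.List.sorted ([] ++ roots) (fun x => x) false) (PySem.Set.empty, []) := by
    refine pv_loopB_fuel (pvKidsB items) names names.length hnd hkm hlen _ _ _ _ hsortmem hbeta (by omega)
  have hmain := pv_main ch (pvKidsB items) names names.length hnd hch hk hlen
    (pvMu names (PySem.Set.empty : PySem.Set String)) (PySem.Set.empty, [])
    (PySem.List.sorted ([] ++ roots) (fun x => x) false) [] (le_refl _) hsortmem (by intro m hm; cases hm)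
  rw [List.append_nil] at hmain
  constructor
  · rw [hroots', hB, hmain, hA]
    rw [pvLoopBC]
    exact congrArg Prod.snd (pv_loopB_nil _ _ _).symm ▸ rfl
  · rw [hA]
    exact (pv_dfsL_inv ch names _ _ pv_inv_empty).1

-- the value each port stores for a name
def pvVal (lineages : List (String × List (String × String))) (name : String) :
    List (String × List String) :=
  [("aliases", []),
   ("parents",
     if pvParentOf ((PySem.Dict.ofList lineages).getD name []) == "none" then []
     else [pvParentOf ((PySem.Dict.ofList lineages).getD name [])])]

theorem pv_convert_eq (lineages : List (String × List (String × String))) :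
    convert_to_silo_format lineages = convert_to_silo_format_alt lineages := by
  obtain ⟨hord, hnd⟩ := pv_order_eq lineages
  rw [show convert_to_silo_format lineages =
      ((topological_sort lineages).foldl
        (fun (silo : PySem.Dict String (List (String × List String))) name =>
          silo.insert name (pvVal lineages name)) PySem.Dict.empty).items from rfl]
  rw [show convert_to_silo_format_alt lineages =
      (PySem.Dict.ofList ((pvOrderB lineages).map
        (fun name => (name, pvVal lineages name)))).items from rfl]
  rw [← hord]
  -- A side: a fold of inserts at fresh distinct keys appends
  rw [PySem.Dict.items_foldl_insert_fresh (topological_sort lineages)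
      (fun a => a) (fun a => pvVal lineages a) PySem.Dict.empty
      (fun a _ => PySem.Dict.contains_empty a) (by simpa using hnd)]
  -- B side: ofList is the same fold of inserts over the mapped pairs
  rw [show PySem.Dict.ofList ((topological_sort lineages).map
        (fun name => (name, pvVal lineages name)))
      = ((topological_sort lineages).map (fun name => (name, pvVal lineages name))).foldl
          (fun (d : PySem.Dict String (List (String × List String))) p => d.insert p.1 p.2)
          PySem.Dict.empty from rfl]
  rw [PySem.Dict.items_foldl_insert_fresh
      ((topological_sort lineages).map (fun name => (name, pvVal lineages name)))
      (fun p => p.1) (fun p => p.2) PySem.Dict.empty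
      (fun a _ => PySem.Dict.contains_empty a.1)
      (by simpa [Function.comp_def] using hnd)]
  simp

-- ===== VERDICT (by name: the statement is the Claim_ definition above) =====
theorem convert_to_silo_format_spec : Claim_equal_convert_to_silo_format := by
  intro lineages _ _
  exact pv_convert_eq lineages
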